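-- pv_equiv track=rewrite | github.com/HappyPilot/Self_Gaming | policy_agent.py | _normalize_skeleton
-- ===== SOURCE A (Python) =====
-- def _normalize_skeleton(text: str) -> str:
--     """Reduce OCR noise by comparing consonant skeletons with collapsed repeats."""
--     if not text:
--         return ""
--     filtered = [ch for ch in text.lower() if ch.isalnum()]
--     if not filtered:
--         return ""
--     vowels = set("aeiouy")
--     skeleton = [ch for ch in filtered if ch not in vowels]
--     if not skeleton:
--         return ""
--     deduped = [skeleton[0]]
--     for ch in skeleton[1:]:
--         if ch != deduped[-1]:
--             deduped.append(ch)
--     return "".join(deduped)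
-- ===== SOURCE B (Python) =====
-- def _normalize_skeleton(text: str) -> str:
--     """Single pass: filter to non-vowel alnum chars while collapsing repeats."""
--     vowels = set("aeiouy")
--     out = []
--     last = None
--     for ch in text.lower():
--         if ch.isalnum() and ch not in vowels and ch != last:
--             out.append(ch)
--             last = ch
--     return "".join(out)
-- ===== Notes on version B (the rewrite author's own statement) =====
-- stated objective: simpler
-- what changed: Fuses A's three list-building passes (alnum filter, vowel filter, dedup loop) and its three empty-guards into one traversal that tracks the last emitted character.
import Mathlib
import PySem

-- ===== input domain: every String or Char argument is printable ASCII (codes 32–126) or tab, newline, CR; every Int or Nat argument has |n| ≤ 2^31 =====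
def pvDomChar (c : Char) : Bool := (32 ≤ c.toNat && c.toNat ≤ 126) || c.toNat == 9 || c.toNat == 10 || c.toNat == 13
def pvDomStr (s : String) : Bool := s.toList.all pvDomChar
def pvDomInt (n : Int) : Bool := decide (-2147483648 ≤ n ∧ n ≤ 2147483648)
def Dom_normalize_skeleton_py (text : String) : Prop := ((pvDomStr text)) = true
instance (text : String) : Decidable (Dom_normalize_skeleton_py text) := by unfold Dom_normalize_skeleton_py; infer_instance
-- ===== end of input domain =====

-- B fuses A's three list-building passes and empty-guards into one traversal tracking the last emitted char (objective: simpler).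

-- ===== PORT A =====
def normalize_skeleton_py (text : String) : String :=
  if text = "" then "" else
  let filtered := ((PySem.Str.lower text).toList).filter PySem.Chars.isalnum
  if filtered = [] then "" else
  let vowels : PySem.Set Char := PySem.Set.ofList "aeiouy".toList
  let skeleton := filtered.filter (fun ch => !(PySem.Set.contains vowels ch))
  match skeleton with
  | [] => ""
  | h :: t =>
    let deduped := t.foldl (fun d ch => if ch ≠ d.getLast! then d ++ [ch] else d) [h]
    String.mk deduped

-- ===== PORT B =====
def normalize_skeleton_py_alt (text : String) : String :=
  let vowels : PySem.Set Char := PySem.Set.ofList "aeiouy".toList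
  let step := fun (st : List Char × Option Char) (ch : Char) =>
    if PySem.Chars.isalnum ch && !(PySem.Set.contains vowels ch) && some ch ≠ st.2
    then (st.1 ++ [ch], some ch) else st
  String.mk (((PySem.Str.lower text).toList).foldl step ([], none)).1

-- ===== PRECONDITION & SPEC =====
def Spec_normalize_skeleton_py (text : String) (out : String) : Prop := out = normalize_skeleton_py_alt text
instance (text : String) (out : String) : Decidable (Spec_normalize_skeleton_py text out) := by unfold Spec_normalize_skeleton_py; infer_instance

-- ===== CLAIM (what is proved, stated in full; the proofs are below) =====
def Claim_equal_normalize_skeleton_py : Prop := ∀ (text : String), Dom_normalize_skeleton_py text → Spec_normalize_skeleton_py text (normalize_skeleton_py text)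

-- ===== LEMMAS AND PROOFS =====

-- the combined per-char test of B
def pvKeep (ch : Char) : Bool :=
  PySem.Chars.isalnum ch && !(PySem.Set.contains (PySem.Set.ofList "aeiouy".toList) ch)

-- recursive shape of the dedup from a known last char
def pvGoC (last : Char) : List Char → List Char
  | [] => []
  | c :: t => if c = last then pvGoC last t else c :: pvGoC c t

-- fused recursion of B: filter + dedup with optional last emitted char
def pvOgo (last : Option Char) : List Char → List Char
  | [] => []
  | c :: t => if pvKeep c && some c ≠ last then c :: pvOgo (some c) t else pvOgo last t

lemma pvGetLast!_append (acc : List Char) (c : Char) : (acc ++ [c]).getLast! = c := by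
  induction acc with
  | nil => rfl
  | cons a as ih =>
    cases as with
    | nil => rfl
    | cons b bs => simpa [List.getLast!, List.getLast] using ih

lemma pvA_foldl (t : List Char) : ∀ (acc : List Char), acc ≠ [] →
    t.foldl (fun d ch => if ch ≠ d.getLast! then d ++ [ch] else d) acc
      = acc ++ pvGoC (acc.getLast!) t := by
  induction t with
  | nil => intro acc _; simp [pvGoC]
  | cons c t ih =>
    intro acc hacc
    rw [List.foldl_cons]
    by_cases hc : c = acc.getLast!
    · rw [if_neg (by simp [hc]), ih acc hacc]
      conv_rhs => rw [pvGoC, if_pos hc]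
    · rw [if_pos hc, ih (acc ++ [c]) (by simp), pvGetLast!_append]
      conv_rhs => rw [pvGoC, if_neg hc]
      rw [List.append_assoc]
      rfl

lemma pvB_foldl (l : List Char) : ∀ (acc : List Char) (last : Option Char),
    (l.foldl (fun (st : List Char × Option Char) ch =>
        if PySem.Chars.isalnum ch && !(PySem.Set.contains (PySem.Set.ofList "aeiouy".toList) ch) && some ch ≠ st.2
        then (st.1 ++ [ch], some ch) else st) (acc, last)).1
      = acc ++ pvOgo last l := by
  induction l with
  | nil => intro acc last; simp [pvOgo]
  | cons c t ih =>
    intro acc last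
    rw [List.foldl_cons]
    by_cases hk : pvKeep c = true
    · by_cases hl : some c = last
      · rw [if_neg (by simp [hl])]
        conv_rhs => rw [pvOgo, if_neg (by simp [hl])]
        exact ih acc last
      · rw [if_pos (by unfold pvKeep at hk; simp_all)]
        conv_rhs => rw [pvOgo, if_pos (by simp [hk, hl])]
        rw [ih (acc ++ [c]) (some c), List.append_assoc]
        rfl
    · rw [if_neg (by unfold pvKeep at hk; simp_all)]
      conv_rhs => rw [pvOgo, if_neg (by simp [hk])]
      exact ih acc last

lemma pvOgo_some (l : List Char) : ∀ (x : Char),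
    pvOgo (some x) l = pvGoC x (l.filter pvKeep) := by
  induction l with
  | nil => intro x; simp [pvOgo, pvGoC]
  | cons c t ih =>
    intro x
    by_cases hk : pvKeep c = true
    · by_cases hc : c = x
      · subst hc; simp [pvOgo, pvGoC, List.filter_cons, hk, ih]
      · simp [pvOgo, pvGoC, List.filter_cons, hk, hc, ih]
    · simp [pvOgo, List.filter_cons, hk, ih]

lemma pvOgo_none (l : List Char) :
    pvOgo none l = match l.filter pvKeep with
      | [] => []
      | h :: t => h :: pvGoC h t := by
  induction l with
  | nil => simp [pvOgo]
  | cons c t ih =>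
    by_cases hk : pvKeep c = true
    · simp [pvOgo, hk, List.filter_cons, pvOgo_some]
    · simp [pvOgo, hk, List.filter_cons, ih]

lemma pvSkeleton_eq (l : List Char) :
    (l.filter PySem.Chars.isalnum).filter
        (fun ch => !(PySem.Set.contains (PySem.Set.ofList "aeiouy".toList) ch))
      = l.filter pvKeep := by
  rw [List.filter_filter]
  apply List.filter_congr
  intro c _
  simp [pvKeep, Bool.and_comm]

-- ===== VERDICT (by name: the statement is the Claim_ definition above) =====
theorem normalize_skeleton_py_spec : Claim_equal_normalize_skeleton_py := by
  intro text _
  unfold Spec_normalize_skeleton_py normalize_skeleton_py normalize_skeleton_py_alt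
  simp only []
  rw [pvB_foldl, List.nil_append, pvOgo_none]
  by_cases h0 : text = ""
  · subst h0; rfl
  · rw [if_neg h0, pvSkeleton_eq]
    by_cases h1 : ((PySem.Str.lower text).toList).filter PySem.Chars.isalnum = []
    · have h2 : ((PySem.Str.lower text).toList).filter pvKeep = [] := by
        rw [← pvSkeleton_eq, h1]; rfl
      rw [if_pos h1, h2]; rfl
    · rw [if_neg h1]
      cases hsk : ((PySem.Str.lower text).toList).filter pvKeep with
      | nil => rfl
      | cons h t =>
        simp only []
        rw [pvA_foldl t [h] (by simp)]
        rfl
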